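-- pv_equiv track=rewrite | github.com/czhu1217/Practise | Algorithms test/bridgeEdges.py | highest_post_order_rec
-- ===== SOURCE A (Python) =====
-- def highest_post_order_rec(S, po, output, marked, currentNode):
--     temp = highestPO = po[currentNode]
--     for neighbor in S[currentNode]:
--         if S[currentNode][neighbor]=='green':
--             if neighbor not in marked:
--                 marked.add(neighbor)
--                 temp = highest_post_order_rec(S,po,output,marked,neighbor)
--         else:
--             temp = po[neighbor]
--         if temp>highestPO:
--             highestPO=temp
--     output[currentNode]=highestPO
--     return highestPO
-- ===== SOURCE B (Python) =====
-- def highest_post_order_rec(S, po, output, marked, currentNode):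
--     # Iterative DFS with an explicit frame stack replacing the recursion.
--     # Each frame: [node, items of S[node], next index, running highest].
--     stack = [[currentNode, list(S[currentNode].items()), 0, po[currentNode]]]
--     result = po[currentNode]
--     while stack:
--         frame = stack[-1]
--         node, items, i, hi = frame
--         pushed = False
--         while i < len(items):
--             nb, color = items[i]
--             i += 1
--             if color == 'green':
--                 if nb not in marked:
--                     marked.add(nb)
--                     frame[2] = i
--                     frame[3] = hi
--                     stack.append([nb, list(S[nb].items()), 0, po[nb]])
--                     pushed = True
--                     break
--             else:
--                 v = po[nb]
--                 if v > hi: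
--                     hi = v
--         if not pushed:
--             output[node] = hi
--             stack.pop()
--             result = hi
--             if stack:
--                 parent = stack[-1]
--                 if hi > parent[3]:
--                     parent[3] = hi
--     return result
-- ===== Notes on version B (the rewrite author's own statement) =====
-- stated objective: alternative
-- what changed: A's self-recursive DFS (call stack, per-call temp/highestPO registers) is replaced by an iterative DFS over an explicit stack of frames (node, neighbor items, index, running highest); a popped child's value is merged into its parent frame, and the redundant temp carry-over of A (a no-op, proved) is dropped.
-- outside the precondition, e.g. on highest_post_order_rec({'a': {}, 'b': {'c': 'red'}}, {'a': 1}, {}, set(), 'a'): A returns 1, B returns 1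
import Mathlib
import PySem

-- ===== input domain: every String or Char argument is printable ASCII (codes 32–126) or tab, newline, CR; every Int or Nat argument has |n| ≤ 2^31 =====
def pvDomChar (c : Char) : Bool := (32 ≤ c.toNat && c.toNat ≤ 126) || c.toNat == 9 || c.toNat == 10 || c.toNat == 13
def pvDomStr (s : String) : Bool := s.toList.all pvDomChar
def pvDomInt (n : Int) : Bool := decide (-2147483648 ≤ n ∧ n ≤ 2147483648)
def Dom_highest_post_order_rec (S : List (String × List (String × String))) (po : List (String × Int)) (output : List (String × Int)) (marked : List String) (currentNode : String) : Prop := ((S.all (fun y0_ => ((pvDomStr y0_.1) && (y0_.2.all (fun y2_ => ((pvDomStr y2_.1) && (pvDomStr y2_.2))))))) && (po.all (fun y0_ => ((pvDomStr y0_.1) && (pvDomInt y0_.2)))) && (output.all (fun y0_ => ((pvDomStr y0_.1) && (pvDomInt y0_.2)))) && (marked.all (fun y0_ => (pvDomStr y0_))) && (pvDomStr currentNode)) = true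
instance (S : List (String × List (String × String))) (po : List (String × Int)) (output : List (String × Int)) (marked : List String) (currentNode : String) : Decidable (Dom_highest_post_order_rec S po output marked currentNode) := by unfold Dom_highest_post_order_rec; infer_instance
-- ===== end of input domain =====

-- B replaces A's recursion by an explicit-stack iterative DFS (same traversal, same
-- mutations of `marked`/`output`); the equivalence proved here is about the RETURN value.
-- Both ports use a fuel parameter only as a termination device; pvFuel provably suffices
-- on Pre_-admitted inputs.

-- ===== PORT A =====
-- the fuel both ports start from (one unit per DFS visit / per stack push)
def pvFuel (S : List (String × List (String × String))) : Nat :=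
  (S.map (fun pr => pr.2.length)).sum + 1

-- A's recursion; one unit of fuel per call. 'for neighbor in S[currentNode]' with the value
-- lookup 'S[currentNode][neighbor]' is ported as iteration over the dict's (key, value)
-- pairs — exact, since a Python dict's keys are unique.
mutual
def pvAvisit (S : List (String × List (String × String))) (po : List (String × Int))
    (fuel : Nat) (output : PySem.Dict String Int) (marked : PySem.Set String)
    (currentNode : String) : Option (Int × PySem.Dict String Int × PySem.Set String) :=
  match fuel with
  | 0 => none
  | f + 1 =>
    match (PySem.Dict.mk po).get? currentNode, (PySem.Dict.mk S).get? currentNode with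
    | some p, some adj => pvAloop S po f currentNode adj p p output marked
    | _, _ => none
termination_by (fuel, 0)
decreasing_by apply Prod.Lex.left; omega

def pvAloop (S : List (String × List (String × String))) (po : List (String × Int))
    (f : Nat) (currentNode : String) (pairs : List (String × String)) (temp hi : Int)
    (output : PySem.Dict String Int) (marked : PySem.Set String) :
    Option (Int × PySem.Dict String Int × PySem.Set String) :=
  match pairs with
  | [] => some (hi, output.insert currentNode hi, marked)
  | (nb, c) :: rest =>
    if c == "green" then
      if PySem.Set.contains marked nb then
        pvAloop S po f currentNode rest temp (if temp > hi then temp else hi) output marked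
      else
        match pvAvisit S po f output (PySem.Set.add marked nb) nb with
        | none => none
        | some (t, output', marked') =>
          pvAloop S po f currentNode rest t (if t > hi then t else hi) output' marked'
    else
      match (PySem.Dict.mk po).get? nb with
      | none => none
      | some t => pvAloop S po f currentNode rest t (if t > hi then t else hi) output marked
termination_by (f, pairs.length + 1)
decreasing_by
  all_goals (apply Prod.Lex.right; simp only [List.length_cons]; omega)
end

def highest_post_order_rec (S : List (String × List (String × String))) (po : List (String × Int)) (output : List (String × Int)) (marked : List String) (currentNode : String) : Int :=
  match pvAvisit S po (pvFuel S) (PySem.Dict.mk output) marked currentNode with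
  | some r => r.1
  | none => 0

-- ===== PORT B =====
-- 'if hi > parent[3]: parent[3] = hi' applied to the frame below the popped one
def pvAdjTop (stack : List (String × List (String × String) × Int)) (hi : Int) :
    List (String × List (String × String) × Int) :=
  match stack with
  | [] => []
  | (pn, pits, ph) :: rr => (pn, pits, if hi > ph then hi else ph) :: rr

@[simp] theorem length_pvAdjTop (stack : List (String × List (String × String) × Int)) (hi : Int) :
    (pvAdjTop stack hi).length = stack.length := by
  cases stack with
  | nil => rfl
  | cons h t => cases h with | mk a b => cases b with | mk c d => rfl

-- the inner 'while i < len(items)' scan of B: either finds a green unmarked neighbour to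
-- push (returning it, the remaining items, the running hi and the grown marked set), or
-- exhausts the items (returning the final hi); none = KeyError on po
def pvBscan (po : List (String × Int)) (marked : PySem.Set String)
    (pairs : List (String × String)) (hi : Int) :
    Option ((String × List (String × String) × Int × PySem.Set String) ⊕ Int) :=
  match pairs with
  | [] => some (.inr hi)
  | (nb, c) :: rest =>
    if c == "green" then
      if PySem.Set.contains marked nb then pvBscan po marked rest hi
      else some (.inl (nb, rest, hi, PySem.Set.add marked nb))
    else
      match (PySem.Dict.mk po).get? nb with
      | none => none
      | some v => pvBscan po marked rest (if v > hi then v else hi)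

-- B's 'while stack:' loop; fuel bounds the number of pushes only
def pvBrun (S : List (String × List (String × String))) (po : List (String × Int))
    (fuel : Nat) (stack : List (String × List (String × String) × Int)) (result : Int)
    (output : PySem.Dict String Int) (marked : PySem.Set String) :
    Option (Int × PySem.Dict String Int × PySem.Set String) :=
  match stack with
  | [] => some (result, output, marked)
  | (node, items, hi) :: rest =>
    match pvBscan po marked items hi with
    | none => none
    | some (.inr hi') =>
      pvBrun S po fuel (pvAdjTop rest hi') hi' (output.insert node hi') marked
    | some (.inl (nb, rem, hi', marked')) =>
      match fuel with
      | 0 => none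
      | f + 1 =>
        match (PySem.Dict.mk S).get? nb, (PySem.Dict.mk po).get? nb with
        | some adjnb, some pnb =>
          pvBrun S po f ((nb, adjnb, pnb) :: (node, rem, hi') :: rest) result output marked'
        | _, _ => none
termination_by (fuel, stack.length)
decreasing_by
  · simp [length_pvAdjTop]; omega
  · omega

def highest_post_order_rec_alt (S : List (String × List (String × String))) (po : List (String × Int)) (output : List (String × Int)) (marked : List String) (currentNode : String) : Int :=
  match (PySem.Dict.mk S).get? currentNode, (PySem.Dict.mk po).get? currentNode with
  | some adj, some p =>
    match pvBrun S po (pvFuel S) [(currentNode, adj, p)] p (PySem.Dict.mk output) marked with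
    | some r => r.1
    | none => 0
  | _, _ => 0

-- ===== PRECONDITION & SPEC =====
-- Pre_ is a sufficient no-KeyError condition: currentNode has entries in po and S, every
-- neighbour named in any adjacency list has a po entry, and every green one also an S entry.
-- It excludes some inputs on which A still returns (unsafe entries that the DFS from
-- currentNode never reaches); see claim.json "cites".
def Pre_highest_post_order_rec (S : List (String × List (String × String))) (po : List (String × Int)) (output : List (String × Int)) (marked : List String) (currentNode : String) : Prop :=
  ((PySem.Dict.mk po).get? currentNode).isSome = true ∧
  ((PySem.Dict.mk S).get? currentNode).isSome = true ∧
  ∀ pr ∈ S, ∀ e ∈ pr.2,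
    ((PySem.Dict.mk po).get? e.1).isSome = true ∧
    (e.2 = "green" → ((PySem.Dict.mk S).get? e.1).isSome = true)
instance (S : List (String × List (String × String))) (po : List (String × Int)) (output : List (String × Int)) (marked : List String) (currentNode : String) : Decidable (Pre_highest_post_order_rec S po output marked currentNode) := by unfold Pre_highest_post_order_rec; infer_instance

def pvWitness_highest_post_order_rec : (List (String × List (String × String))) × (List (String × Int)) × (List (String × Int)) × List String × String :=
  ([("a", [("b", "green"), ("c", "red")]), ("b", [("a", "green")]), ("c", [])],
   [("a", (3 : Int)), ("b", (7 : Int)), ("c", (5 : Int))], [], [], "a")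

def Spec_highest_post_order_rec (S : List (String × List (String × String))) (po : List (String × Int)) (output : List (String × Int)) (marked : List String) (currentNode : String) (out : Int) : Prop := out = highest_post_order_rec_alt S po output marked currentNode
instance (S : List (String × List (String × String))) (po : List (String × Int)) (output : List (String × Int)) (marked : List String) (currentNode : String) (out : Int) : Decidable (Spec_highest_post_order_rec S po output marked currentNode out) := by unfold Spec_highest_post_order_rec; infer_instance

-- ===== CLAIM (what is proved, stated in full; the proofs are below) =====
def Claim_equal_highest_post_order_rec : Prop := ∀ (S : List (String × List (String × String))) (po : List (String × Int)) (output : List (String × Int)) (marked : List String) (currentNode : String), Dom_highest_post_order_rec S po output marked currentNode → Pre_highest_post_order_rec S po output marked currentNode → Spec_highest_post_order_rec S po output marked currentNode (highest_post_order_rec S po output marked currentNode)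

-- ===== LEMMAS AND PROOFS =====

-- all neighbour names occurring in S's adjacency lists
def pvNbrs (S : List (String × List (String × String))) : List String :=
  S.flatMap (fun pr => pr.2.map Prod.fst)

theorem pvBrun_congr (S : List (String × List (String × String))) (po : List (String × Int))
    (fuel : Nat) (node : String) (items : List (String × String)) (hi : Int)
    (items2 : List (String × String)) (hi2 : Int)
    (stack : List (String × List (String × String) × Int)) (res : Int)
    (out : PySem.Dict String Int) (mk : PySem.Set String)
    (h : pvBscan po mk items hi = pvBscan po mk items2 hi2) :
    pvBrun S po fuel ((node, items, hi) :: stack) res out mk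
      = pvBrun S po fuel ((node, items2, hi2) :: stack) res out mk := by
  rw [pvBrun, pvBrun, h]

theorem pvCntMono (l : List String) (mk mk' : List String) (h : ∀ x, x ∈ mk → x ∈ mk') :
    (l.filter (fun x => !mk'.contains x)).length ≤ (l.filter (fun x => !mk.contains x)).length := by
  apply List.Sublist.length_le
  apply List.monotone_filter_right
  intro a ha
  simp at ha ⊢
  exact fun hmem => ha (h a hmem)

theorem pvNotMem (s : List String) (x : String) (h : PySem.Set.contains s x = false) : x ∉ s := by
  intro hx
  simp [PySem.Set.contains] at h
  exact h hx

theorem pvAdd (s : PySem.Set String) (x : String) (h : PySem.Set.contains s x = false) :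
    PySem.Set.add s x = s ++ [x] := by
  simp [PySem.Set.add]
  intro hx
  exact absurd hx (pvNotMem s x h)

theorem pvNodupLen (ext L : List String) (h1 : ext.Nodup) (h2 : ∀ x ∈ ext, x ∈ L) : ext.length ≤ L.length := by
  have : List.Subperm ext L := List.subperm_of_subset h1 h2
  exact this.length_le

theorem pvCntStrict (l : List String) (mk : List String) (nb : String) (hnb : nb ∈ l) (hm : nb ∉ mk) :
    (l.filter (fun x => !(mk ++ [nb]).contains x)).length < (l.filter (fun x => !mk.contains x)).length := by
  have hsub : List.Sublist (l.filter (fun x => !(mk ++ [nb]).contains x)) (l.filter (fun x => !mk.contains x)) := by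
    apply List.monotone_filter_right
    intro a ha
    simp at ha ⊢
    exact fun hmem => ha.1 hmem
  apply Nat.lt_of_le_of_ne hsub.length_le
  intro heq
  have := hsub.eq_of_length heq
  have hmem1 : nb ∈ l.filter (fun x => !mk.contains x) := by
    simp [List.mem_filter, hnb, hm]
  rw [← this] at hmem1
  simp [List.mem_filter] at hmem1

theorem pvSim (S : List (String × List (String × String))) (po : List (String × Int)) :
    ∀ (f : Nat) (out : PySem.Dict String Int) (mk : PySem.Set String) (cur : String)
      (hi : Int) (out' : PySem.Dict String Int) (mk' : PySem.Set String),
    pvAvisit S po f out mk cur = some (hi, out', mk') →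
    ∃ (p : Int) (adj : List (String × String)) (ext : List String),
      (PySem.Dict.mk po).get? cur = some p ∧ (PySem.Dict.mk S).get? cur = some adj ∧
      mk' = mk ++ ext ∧ ext.Nodup ∧ (∀ x ∈ ext, x ∈ pvNbrs S ∧ x ∉ mk) ∧
      ∀ (g : Nat) (stack : List (String × List (String × String) × Int)) (res : Int),
        pvBrun S po (g + ext.length) ((cur, adj, p) :: stack) res out mk
          = pvBrun S po g (pvAdjTop stack hi) hi out' mk' := by
  intro f
  induction f with
  | zero =>
    intro out mk cur hi out' mk' h
    rw [pvAvisit] at h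
    exact absurd h (by simp)
  | succ f IH =>
    have hloop : ∀ (pairs : List (String × String)), (∀ e ∈ pairs, e.1 ∈ pvNbrs S) →
        ∀ (temp hi : Int) (out : PySem.Dict String Int) (mk : PySem.Set String) (cur : String)
          (hi' : Int) (out' : PySem.Dict String Int) (mk' : PySem.Set String),
        temp ≤ hi →
        pvAloop S po f cur pairs temp hi out mk = some (hi', out', mk') →
        ∃ ext, mk' = mk ++ ext ∧ ext.Nodup ∧ (∀ x ∈ ext, x ∈ pvNbrs S ∧ x ∉ mk) ∧
          ∀ (g : Nat) (stack : List (String × List (String × String) × Int)) (res : Int),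
            pvBrun S po (g + ext.length) ((cur, pairs, hi) :: stack) res out mk
              = pvBrun S po g (pvAdjTop stack hi') hi' out' mk' := by
      intro pairs
      induction pairs with
      | nil =>
        intro _ temp hi out mk cur hi' out' mk' hth h
        rw [pvAloop] at h
        have h' : hi = hi' ∧ out.insert cur hi = out' ∧ mk = mk' := by simpa using h
        obtain ⟨rfl, rfl, rfl⟩ := h'
        refine ⟨[], by simp, by simp, by simp, ?_⟩
        intro g stack res
        rw [pvBrun]
        simp [pvBscan]
      | cons e rest IHrest =>
        obtain ⟨nb, c⟩ := e
        intro hmem temp hi out mk cur hi' out' mk' hth h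
        rw [pvAloop] at h
        by_cases hc : (c == "green") = true
        · rw [if_pos hc] at h
          by_cases hm : PySem.Set.contains mk nb = true
          · rw [if_pos hm] at h
            have hmax : (if temp > hi then temp else hi) = hi := by split <;> omega
            rw [hmax] at h
            obtain ⟨ext, hmk, hnod, hx, hB⟩ :=
              IHrest (fun e he => hmem e (List.mem_cons_of_mem _ he)) temp hi out mk cur hi' out' mk' hth h
            refine ⟨ext, hmk, hnod, hx, ?_⟩
            intro g stack res
            rw [← hB g stack res]
            apply pvBrun_congr
            have hmm : nb ∈ mk := by simpa using hm
            rw [pvBscan]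
            simp [hc, hmm]
          · have hm' : PySem.Set.contains mk nb = false := by simpa using hm
            rw [if_neg hm] at h
            cases hv : pvAvisit S po f out (PySem.Set.add mk nb) nb with
            | none => rw [hv] at h; exact absurd h (by simp)
            | some r =>
              obtain ⟨t, out2, mk2⟩ := r
              rw [hv] at h
              obtain ⟨p2, adj2, e1, hp2, hadj2, hmk2, hnod1, hx1, hB1⟩ := IH out (PySem.Set.add mk nb) nb t out2 mk2 hv
              have haddeq : PySem.Set.add mk nb = mk ++ [nb] := pvAdd mk nb hm'
              rw [haddeq] at hmk2 hx1 hB1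
              have hnbmem : nb ∉ mk := pvNotMem mk nb hm'
              obtain ⟨e2, hmk', hnod2, hx2, hB2⟩ :=
                IHrest (fun e he => hmem e (List.mem_cons_of_mem _ he)) t (if t > hi then t else hi)
                  out2 mk2 cur hi' out' mk' (by split <;> omega) h
              refine ⟨nb :: (e1 ++ e2), ?_, ?_, ?_, ?_⟩
              · rw [hmk', hmk2]; simp
              · refine List.nodup_cons.mpr ⟨?_, List.Nodup.append hnod1 hnod2 ?_⟩
                · intro hcon
                  rcases List.mem_append.mp hcon with h1 | h2
                  · exact (hx1 nb h1).2 (by simp)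
                  · have := (hx2 nb h2).2; rw [hmk2] at this; exact this (by simp)
                · intro a ha1 ha2
                  have := (hx2 a ha2).2; rw [hmk2] at this
                  exact this (by simp [ha1])
              · intro x hxm
                rcases List.mem_cons.mp hxm with rfl | hx'
                · exact ⟨hmem (x, c) (by simp), hnbmem⟩
                · rcases List.mem_append.mp hx' with h1 | h2
                  · exact ⟨(hx1 x h1).1, fun hmk0 => (hx1 x h1).2 (List.mem_append.mpr (Or.inl hmk0))⟩
                  · refine ⟨(hx2 x h2).1, fun hmk0 => (hx2 x h2).2 ?_⟩
                    rw [hmk2]; simp [hmk0]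
              · intro g stack res
                rw [pvBrun]
                rw [show pvBscan po mk ((nb, c) :: rest) hi
                      = some (.inl (nb, rest, hi, PySem.Set.add mk nb)) from by
                    rw [pvBscan]; simp [hc, hnbmem]]
                have hfuel : g + (nb :: (e1 ++ e2)).length = (g + e2.length + e1.length) + 1 := by
                  simp; omega
                rw [hfuel]
                simp only [hadj2, hp2, haddeq]
                rw [hB1 (g + e2.length) ((cur, rest, hi) :: stack) res]
                rw [show pvAdjTop ((cur, rest, hi) :: stack) t
                      = (cur, rest, if t > hi then t else hi) :: stack from rfl]
                exact hB2 g stack t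
        · rw [if_neg hc] at h
          cases hpo : (PySem.Dict.mk po).get? nb with
          | none => rw [hpo] at h; exact absurd h (by simp)
          | some v =>
            rw [hpo] at h
            obtain ⟨ext, hmk, hnod, hx, hB⟩ :=
              IHrest (fun e he => hmem e (List.mem_cons_of_mem _ he)) v (if v > hi then v else hi)
                out mk cur hi' out' mk' (by split <;> omega) h
            refine ⟨ext, hmk, hnod, hx, ?_⟩
            intro g stack res
            rw [← hB g stack res]
            apply pvBrun_congr
            rw [pvBscan]
            simp [hc, hpo]
    intro out mk cur hi out' mk' h
    rw [pvAvisit] at h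
    cases hp : (PySem.Dict.mk po).get? cur with
    | none => rw [hp] at h; exact absurd h (by simp)
    | some p =>
      cases hs : (PySem.Dict.mk S).get? cur with
      | none => rw [hp, hs] at h; exact absurd h (by simp)
      | some adj =>
        rw [hp, hs] at h
        have hmemS : (cur, adj) ∈ S := PySem.Dict.mem_items_of_get?_eq_some { items := S } hs
        have hmem : ∀ e ∈ adj, e.1 ∈ pvNbrs S := by
          intro e he
          simp only [pvNbrs, List.mem_flatMap]
          exact ⟨(cur, adj), hmemS, List.mem_map.mpr ⟨e, he, rfl⟩⟩
        obtain ⟨ext, hmk, hnod, hx, hB⟩ := hloop adj hmem p p out mk cur hi out' mk' le_rfl h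
        exact ⟨p, adj, ext, rfl, rfl, hmk, hnod, hx, hB⟩

theorem pvTot (S : List (String × List (String × String))) (po : List (String × Int))
    (hsafe : ∀ pr ∈ S, ∀ e ∈ pr.2,
      ((PySem.Dict.mk po).get? e.1).isSome = true ∧
      (e.2 = "green" → ((PySem.Dict.mk S).get? e.1).isSome = true)) :
    ∀ (f : Nat) (out : PySem.Dict String Int) (mk : PySem.Set String) (cur : String),
    ((PySem.Dict.mk po).get? cur).isSome = true →
    ((PySem.Dict.mk S).get? cur).isSome = true →
    (((pvNbrs S).dedup).filter (fun x => !mk.contains x)).length < f →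
    (pvAvisit S po f out mk cur).isSome = true := by
  intro f
  induction f with
  | zero => intro out mk cur _ _ hcnt; omega
  | succ f IH =>
    have hloop : ∀ (pairs : List (String × String)),
        (∀ e ∈ pairs, e.1 ∈ pvNbrs S ∧ ((PySem.Dict.mk po).get? e.1).isSome = true ∧
          (e.2 = "green" → ((PySem.Dict.mk S).get? e.1).isSome = true)) →
        ∀ (temp hi : Int) (out : PySem.Dict String Int) (mk : PySem.Set String) (cur : String),
        (((pvNbrs S).dedup).filter (fun x => !mk.contains x)).length ≤ f →
        (pvAloop S po f cur pairs temp hi out mk).isSome = true := by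
      intro pairs
      induction pairs with
      | nil =>
        intro _ temp hi out mk cur _
        rw [pvAloop]; rfl
      | cons e rest IHrest =>
        obtain ⟨nb, c⟩ := e
        intro hmem temp hi out mk cur hcnt
        have hmemtail := fun e he => hmem e (List.mem_cons_of_mem _ he)
        obtain ⟨hnbN, hnbpo, hnbS⟩ := hmem (nb, c) (by simp)
        rw [pvAloop]
        by_cases hc : (c == "green") = true
        · rw [if_pos hc]
          by_cases hm : PySem.Set.contains mk nb = true
          · rw [if_pos hm]
            exact IHrest hmemtail temp _ out mk cur hcnt
          · have hm' : PySem.Set.contains mk nb = false := by simpa using hm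
            rw [if_neg hm]
            have hnbmem : nb ∉ mk := pvNotMem mk nb hm'
            have hdec : (((pvNbrs S).dedup).filter (fun x => !(mk ++ [nb]).contains x)).length
                < (((pvNbrs S).dedup).filter (fun x => !mk.contains x)).length :=
              pvCntStrict _ mk nb (List.mem_dedup.mpr hnbN) hnbmem
            have hS : ((PySem.Dict.mk S).get? nb).isSome = true := hnbS (by simpa using hc)
            have hv := IH out (mk ++ [nb]) nb hnbpo hS (by omega)
            rw [← pvAdd mk nb hm'] at hv
            obtain ⟨⟨t, out2, mk2⟩, hveq⟩ := Option.isSome_iff_exists.mp hv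
            rw [hveq]
            -- growth of marked across the child visit
            obtain ⟨_, _, e1, _, _, hmk2, _, _, _⟩ := pvSim S po f out (PySem.Set.add mk nb) nb t out2 mk2 hveq
            have hmono : (((pvNbrs S).dedup).filter (fun x => !mk2.contains x)).length
                ≤ (((pvNbrs S).dedup).filter (fun x => !(mk ++ [nb]).contains x)).length := by
              apply pvCntMono
              intro x hx
              rw [hmk2, pvAdd mk nb hm']
              simp at hx ⊢
              tauto
            exact IHrest hmemtail t _ out2 mk2 cur (by omega)
        · rw [if_neg hc]
          obtain ⟨v, hveq⟩ := Option.isSome_iff_exists.mp hnbpo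
          rw [hveq]
          exact IHrest hmemtail v _ out mk cur hcnt
    intro out mk cur hpo hS hcnt
    obtain ⟨p, hp⟩ := Option.isSome_iff_exists.mp hpo
    obtain ⟨adj, hs⟩ := Option.isSome_iff_exists.mp hS
    rw [pvAvisit, hp, hs]
    have hmemS : (cur, adj) ∈ S := PySem.Dict.mem_items_of_get?_eq_some { items := S } hs
    apply hloop adj ?_ p p out mk cur (by omega)
    intro e he
    refine ⟨?_, (hsafe (cur, adj) hmemS e he).1, (hsafe (cur, adj) hmemS e he).2⟩
    simp only [pvNbrs, List.mem_flatMap]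
    exact ⟨(cur, adj), hmemS, List.mem_map.mpr ⟨e, he, rfl⟩⟩


-- ===== VERDICT (by name: the statement is the Claim_ definition above) =====
theorem highest_post_order_rec_spec : Claim_equal_highest_post_order_rec := by
  intro S po output marked cur _ hpre
  unfold Spec_highest_post_order_rec
  unfold Pre_highest_post_order_rec at hpre
  obtain ⟨hp, hs, hsafe⟩ := hpre
  have hNlen : (pvNbrs S).length + 1 = pvFuel S := by
    simp [pvNbrs, pvFuel, List.length_flatMap]
  have hcnt : (((pvNbrs S).dedup).filter (fun x => !marked.contains x)).length < pvFuel S := by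
    have h1 := List.length_filter_le (fun x => !marked.contains x) ((pvNbrs S).dedup)
    have h2 := (List.dedup_sublist (pvNbrs S)).length_le
    omega
  have htot := pvTot S po hsafe (pvFuel S) (PySem.Dict.mk output) marked cur hp hs hcnt
  obtain ⟨⟨hi, out', mk'⟩, hv⟩ := Option.isSome_iff_exists.mp htot
  obtain ⟨p, adj, ext, hp', hadj', hmk', hnod, hxm, hB⟩ :=
    pvSim S po (pvFuel S) (PySem.Dict.mk output) marked cur hi out' mk' hv
  have hk : ext.length ≤ (pvNbrs S).length := pvNodupLen ext _ hnod (fun x hx => (hxm x hx).1)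
  have hfuel : pvFuel S = (pvFuel S - ext.length) + ext.length := by omega
  unfold highest_post_order_rec highest_post_order_rec_alt
  simp only [hadj', hp', hv]
  rw [hfuel, hB (pvFuel S - ext.length) [] p]
  rw [show pvAdjTop [] hi = [] from rfl, pvBrun]
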